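-- pv_equiv track=rewrite | github.com/josefkarimi/josef_solutions | Leetcode/3_agust/858 Mirror Reflection.py | mirrorReflection
-- ===== SOURCE A (Python) =====
-- def mirrorReflection(p: int, q: int) -> int:
--     while p%2 == 0 and q%2 == 0:
--         p = p//2
--         q = q//2
--     if p%2 == 0 :
--         return 2
--     else:
--         if q%2 == 1 :
--             return 1
--         else :
--             return 0
-- ===== SOURCE B (Python) =====
-- def mirrorReflection(p: int, q: int) -> int:
--     a, b = abs(p), abs(q)
--     g, h = a, b
--     while h:
--         g, h = h, g % h
--     a //= g
--     b //= g
--     if a % 2 == 0: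
--         return 2
--     if b % 2 == 1:
--         return 1
--     return 0
-- ===== Notes on version B (the rewrite author's own statement) =====
-- stated objective: alternative
-- what changed: Replaces the loop that strips shared factors of 2 with a full gcd reduction (hand-written Euclid, since A imports nothing): divide p and q by gcd(p,q) once, then apply the same parity branch; dividing by the odd part of the gcd preserves parities, so the results agree.
-- outside the precondition, e.g. on mirrorReflection(0, 0): A does not finish within the time limit, B raises ZeroDivisionError
import Mathlib
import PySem

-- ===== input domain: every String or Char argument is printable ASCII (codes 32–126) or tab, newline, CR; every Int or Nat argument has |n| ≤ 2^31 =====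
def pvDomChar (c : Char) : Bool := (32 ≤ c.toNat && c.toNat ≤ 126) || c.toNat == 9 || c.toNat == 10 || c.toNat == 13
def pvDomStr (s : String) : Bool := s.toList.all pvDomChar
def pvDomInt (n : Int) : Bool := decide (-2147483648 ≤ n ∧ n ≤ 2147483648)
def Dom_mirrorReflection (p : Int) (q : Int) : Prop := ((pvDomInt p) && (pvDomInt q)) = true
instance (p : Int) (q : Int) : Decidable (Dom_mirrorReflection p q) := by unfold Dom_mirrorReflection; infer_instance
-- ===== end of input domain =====

-- B replaces A's strip-shared-factors-of-2 loop by one full gcd reduction (hand-written Euclid) followed by the same parity branch (objective: alternative).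

-- ===== PORT A =====
-- A's while loop, fuel-bounded (fuel only makes the recursion total; it never runs out when (p,q) ≠ (0,0))
def mirrorFuelA : Nat → Int → Int → Int
  | 0, _, _ => 0
  | n+1, p, q =>
    if PySem.Int.mod p 2 = 0 ∧ PySem.Int.mod q 2 = 0 then
      mirrorFuelA n (PySem.Int.floordiv p 2) (PySem.Int.floordiv q 2)
    else if PySem.Int.mod p 2 = 0 then 2
    else if PySem.Int.mod q 2 = 1 then 1
    else 0

def mirrorReflection (p : Int) (q : Int) : Int :=
  mirrorFuelA (p.natAbs + q.natAbs + 1) p q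

-- ===== PORT B =====
-- B's `while h: g, h = h, g % h`, fuel-bounded (fuel never runs out: |g % h| < |h|)
def euclidFuel : Nat → Int → Int → Int
  | 0, g, _ => g
  | n+1, g, h => if h = 0 then g else euclidFuel n h (PySem.Int.mod g h)

def mirrorReflection_alt (p : Int) (q : Int) : Int :=
  let a := |p|
  let b := |q|
  let g := euclidFuel (b.natAbs + 1) a b
  let a2 := PySem.Int.floordiv a g
  let b2 := PySem.Int.floordiv b g
  if PySem.Int.mod a2 2 = 0 then 2
  else if PySem.Int.mod b2 2 = 1 then 1
  else 0

-- ===== PRECONDITION & SPEC =====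
-- On p = q = 0 A loops forever and B raises ZeroDivisionError; Pre_ excludes exactly that input.
def Pre_mirrorReflection (p : Int) (q : Int) : Prop := ¬ (p = 0 ∧ q = 0)
instance (p : Int) (q : Int) : Decidable (Pre_mirrorReflection p q) := by unfold Pre_mirrorReflection; infer_instance
def pvWitness_mirrorReflection : Int × Int := (2, 3)

def Spec_mirrorReflection (p : Int) (q : Int) (out : Int) : Prop := out = mirrorReflection_alt p q
instance (p : Int) (q : Int) (out : Int) : Decidable (Spec_mirrorReflection p q out) := by unfold Spec_mirrorReflection; infer_instance

-- ===== CLAIM (what is proved, stated in full; the proofs are below) =====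
def Claim_equal_mirrorReflection : Prop := ∀ (p : Int) (q : Int), Dom_mirrorReflection p q → Pre_mirrorReflection p q → Spec_mirrorReflection p q (mirrorReflection p q)

-- ===== LEMMAS AND PROOFS =====

-- the shared final parity branch, over Nat
def natBranch (a b : Nat) : Int :=
  if a % 2 = 0 then 2 else if b % 2 = 1 then 1 else 0

theorem mod_two_int (x : Int) : PySem.Int.mod x 2 = x % 2 :=
  PySem.Int.mod_eq_emod_of_pos (by norm_num)

theorem euclidFuel_eq_gcd : ∀ (n : Nat) (g h : Int), 0 ≤ g → 0 ≤ h → h.natAbs < n →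
    euclidFuel n g h = (Int.gcd g h : Int) := by
  intro n
  induction n with
  | zero => intro g h _ _ hlt; omega
  | succ n ih =>
    intro g h hg hh hlt
    by_cases h0 : h = 0
    · subst h0
      have e1 : Int.gcd g 0 = g.natAbs := by simp [Int.gcd]
      have e2 : euclidFuel (n+1) g 0 = g := by simp [euclidFuel]
      rw [e2, e1]; omega
    · have hpos : 0 < h := lt_of_le_of_ne hh (Ne.symm h0)
      have hmod : PySem.Int.mod g h = g % h := PySem.Int.mod_eq_emod_of_pos hpos
      have hcast : g % h = ((g.natAbs % h.natAbs : Nat) : Int) := by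
        have hg' : ((g.natAbs : Nat) : Int) = g := by omega
        have hh' : ((h.natAbs : Nat) : Int) = h := by omega
        rw [Int.natCast_mod, hg', hh']
      have hnm : (g % h).natAbs = g.natAbs % h.natAbs := by
        rw [hcast]; exact Int.natAbs_natCast _
      have hhn : 0 < h.natAbs := by omega
      have hlt2 : g.natAbs % h.natAbs < h.natAbs := Nat.mod_lt _ hhn
      have hmlt : (g % h).natAbs < n := by omega
      have hmn : 0 ≤ g % h := Int.emod_nonneg g h0
      have e3 : euclidFuel (n+1) g h = euclidFuel n h (g % h) := by
        simp [euclidFuel, h0, hmod]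
      rw [e3, ih h (g % h) hh hmn hmlt]
      congr 1
      rw [Int.gcd, Int.gcd, hnm]
      conv_rhs => rw [Nat.gcd_comm, Nat.gcd_rec]
      exact Nat.gcd_comm _ _

theorem alt_char (p q : Int) :
    mirrorReflection_alt p q =
      natBranch (p.natAbs / Nat.gcd p.natAbs q.natAbs) (q.natAbs / Nat.gcd p.natAbs q.natAbs) := by
  have ha : |p| = (p.natAbs : Int) := Int.abs_eq_natAbs p
  have hb : |q| = (q.natAbs : Int) := Int.abs_eq_natAbs q
  have hg : euclidFuel ((|q|).natAbs + 1) |p| |q| = (Nat.gcd p.natAbs q.natAbs : Int) := by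
    rw [euclidFuel_eq_gcd ((|q|).natAbs + 1) |p| |q| (abs_nonneg p) (abs_nonneg q) (by omega)]
    congr 1
    rw [Int.gcd, Int.natAbs_abs, Int.natAbs_abs]
  simp only [mirrorReflection_alt]
  rw [hg, ha, hb, PySem.Int.floordiv_natCast, PySem.Int.floordiv_natCast,
    mod_two_int, mod_two_int]
  unfold natBranch
  split_ifs <;> omega

-- halving step for B's characterization
theorem natBranch_double (a b : Nat) :
    natBranch (2*a / Nat.gcd (2*a) (2*b)) (2*b / Nat.gcd (2*a) (2*b)) =
    natBranch (a / Nat.gcd a b) (b / Nat.gcd a b) := by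
  rw [Nat.gcd_mul_left 2 a b, Nat.mul_div_mul_left _ _ (by norm_num : 0 < 2),
    Nat.mul_div_mul_left _ _ (by norm_num : 0 < 2)]

-- base step: gcd odd → dividing by it preserves both parities
theorem natBranch_odd (a b : Nat) (hodd : ¬ (a % 2 = 0 ∧ b % 2 = 0)) :
    natBranch (a / Nat.gcd a b) (b / Nat.gcd a b) = natBranch a b := by
  set g := Nat.gcd a b with hg
  have hga : g ∣ a := Nat.gcd_dvd_left a b
  have hgb : g ∣ b := Nat.gcd_dvd_right a b
  have hgodd : g % 2 = 1 := by
    rcases Nat.mod_two_eq_zero_or_one g with h | h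
    · exfalso
      have h2 : 2 ∣ g := Nat.dvd_of_mod_eq_zero h
      exact hodd ⟨Nat.mod_eq_zero_of_dvd (h2.trans hga), Nat.mod_eq_zero_of_dvd (h2.trans hgb)⟩
    · exact h
  have hg0 : g ≠ 0 := by intro h; rw [h] at hgodd; simp at hgodd
  obtain ⟨a', ha'⟩ := hga
  obtain ⟨b', hb'⟩ := hgb
  have hda : a / g = a' := by rw [ha', Nat.mul_div_cancel_left _ (Nat.pos_of_ne_zero hg0)]
  have hdb : b / g = b' := by rw [hb', Nat.mul_div_cancel_left _ (Nat.pos_of_ne_zero hg0)]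
  have hpa : a % 2 = a' % 2 := by rw [ha', Nat.mul_mod, hgodd]; omega
  have hpb : b % 2 = b' % 2 := by rw [hb', Nat.mul_mod, hgodd]; omega
  unfold natBranch
  rw [hda, hdb, hpa, hpb]

theorem main_lemma : ∀ (n : Nat) (p q : Int), ¬ (p = 0 ∧ q = 0) → p.natAbs + q.natAbs < n →
    mirrorFuelA n p q = mirrorReflection_alt p q := by
  intro n
  induction n with
  | zero => intro p q _ hlt; omega
  | succ n ih =>
    intro p q hne hlt
    by_cases hev : PySem.Int.mod p 2 = 0 ∧ PySem.Int.mod q 2 = 0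
    · -- both even: one halving step
      rw [mod_two_int, mod_two_int] at hev
      obtain ⟨a, rfl⟩ : (2 : Int) ∣ p := Int.dvd_of_emod_eq_zero hev.1
      obtain ⟨b, rfl⟩ : (2 : Int) ∣ q := Int.dvd_of_emod_eq_zero hev.2
      have hd2a : PySem.Int.floordiv (2*a) 2 = a := by
        rw [PySem.Int.floordiv_eq_ediv_of_pos (by norm_num)]
        exact Int.mul_ediv_cancel_left a (by norm_num)
      have hd2b : PySem.Int.floordiv (2*b) 2 = b := by
        rw [PySem.Int.floordiv_eq_ediv_of_pos (by norm_num)]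
        exact Int.mul_ediv_cancel_left b (by norm_num)
      have hne' : ¬ (a = 0 ∧ b = 0) := by
        intro ⟨h1, h2⟩; exact hne ⟨by rw [h1]; ring, by rw [h2]; ring⟩
      have hlt' : a.natAbs + b.natAbs < n := by
        have h1 : (2*a).natAbs = 2 * a.natAbs := by omega
        have h2 : (2*b).natAbs = 2 * b.natAbs := by omega
        omega
      have e1 : mirrorFuelA (n+1) (2*a) (2*b) = mirrorFuelA n (PySem.Int.floordiv (2*a) 2) (PySem.Int.floordiv (2*b) 2) := by
        simp only [mirrorFuelA]
        rw [if_pos (by rw [mod_two_int, mod_two_int]; exact hev)]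
      rw [e1, hd2a, hd2b, ih a b hne' hlt', alt_char a b, alt_char (2*a) (2*b)]
      have h1 : (2*a).natAbs = 2 * a.natAbs := by omega
      have h2 : (2*b).natAbs = 2 * b.natAbs := by omega
      rw [h1, h2, natBranch_double]
    · -- at least one odd: the final branch is taken; gcd is odd
      rw [alt_char p q, natBranch_odd]
      · simp only [mirrorFuelA]
        unfold natBranch
        rw [if_neg hev, mod_two_int, mod_two_int]
        have h1 : p % 2 = (p.natAbs % 2 : Nat) := by omega
        have h2 : q % 2 = (q.natAbs % 2 : Nat) := by omega
        rw [h1, h2]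
        norm_cast
      · rw [mod_two_int, mod_two_int] at hev
        intro ⟨h1, h2⟩
        exact hev ⟨by omega, by omega⟩

-- ===== VERDICT (by name: the statement is the Claim_ definition above) =====
theorem mirrorReflection_spec : Claim_equal_mirrorReflection := by
  intro p q _ hpre
  unfold Spec_mirrorReflection mirrorReflection
  exact main_lemma (p.natAbs + q.natAbs + 1) p q hpre (by omega)
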